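-- pv_equiv track=rewrite | github.com/roguetrainer/decodokq-syndrome-solver | src/codes/steane.py | visualize_error
-- ===== SOURCE A (Python) =====
-- from typing import List, Tuple, Dict, Optional
--
-- def visualize_error(error_locations: List[int]) -> str:
--     """
--     Create a text visualization of errors on the 7 qubits.
--
--     Args:
--         error_locations: List of qubit indices with errors
--
--     Returns:
--         String representation
--     """
--     visual = []
--     for i in range(7):
--         if i in error_locations:
--             visual.append(f"Q{i}[X]")
--         else:
--             visual.append(f"Q{i}[ ]")
--     return " ".join(visual)
-- ===== SOURCE B (Python) =====
-- def visualize_error(error_locations):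
--     cells = [f"Q{i}[ ]" for i in range(7)]
--     for loc in error_locations:
--         if 0 <= loc < 7:
--             cells[loc] = f"Q{loc}[X]"
--     return " ".join(cells)
-- ===== Notes on version B (the rewrite author's own statement) =====
-- stated objective: faster
-- what changed: B builds the 7 placeholder cells once and loops over the error list indexing the marked cell, instead of scanning the 7 positions and testing list membership in the error list for each.
import Mathlib
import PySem

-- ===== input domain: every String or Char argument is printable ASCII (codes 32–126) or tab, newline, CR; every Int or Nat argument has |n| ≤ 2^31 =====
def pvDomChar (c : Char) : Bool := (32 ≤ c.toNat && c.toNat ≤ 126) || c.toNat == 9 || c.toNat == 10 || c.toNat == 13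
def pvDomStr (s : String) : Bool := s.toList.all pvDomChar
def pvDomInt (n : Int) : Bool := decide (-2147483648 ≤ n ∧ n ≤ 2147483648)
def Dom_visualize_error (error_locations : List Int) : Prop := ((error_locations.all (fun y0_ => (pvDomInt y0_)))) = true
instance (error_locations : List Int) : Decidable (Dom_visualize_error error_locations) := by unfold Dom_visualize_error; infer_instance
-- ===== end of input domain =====

-- B loops over errors indexing a prebuilt placeholder list instead of scanning positions with a membership test; same values, alternative decomposition.

-- ===== PORT A =====
-- A: visual = []; for i in range(7): append "Qi[X]" if i in error_locations else "Qi[ ]"; " ".join(visual)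
def visualize_error (error_locations : List Int) : String :=
  let visual : List String :=
    (PySem.List.pyRange 0 7 1).foldl
      (fun acc i =>
        if error_locations.contains i then
          acc ++ ["Q" ++ PySem.Int.toStr i ++ "[X]"]
        else
          acc ++ ["Q" ++ PySem.Int.toStr i ++ "[ ]"])
      []
  PySem.Str.join " " visual

-- ===== PORT B =====
-- B: cells = ["Qi[ ]" for i in range(7)]; for loc in errors: if 0 <= loc < 7: cells[loc] = "Qloc[X]"; " ".join(cells)
def visualize_error_alt (error_locations : List Int) : String :=
  let cells0 : List String :=
    (PySem.List.pyRange 0 7 1).map (fun i => "Q" ++ PySem.Int.toStr i ++ "[ ]")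
  let cells : List String :=
    error_locations.foldl
      (fun cs loc =>
        if 0 ≤ loc ∧ loc < 7 then cs.set loc.toNat ("Q" ++ PySem.Int.toStr loc ++ "[X]") else cs)
      cells0
  PySem.Str.join " " cells

-- ===== PRECONDITION & SPEC =====
def Spec_visualize_error (error_locations : List Int) (out : String) : Prop := out = visualize_error_alt error_locations
instance (error_locations : List Int) (out : String) : Decidable (Spec_visualize_error error_locations out) := by unfold Spec_visualize_error; infer_instance

-- ===== CLAIM (what is proved, stated in full; the proofs are below) =====
def Claim_equal_visualize_error : Prop := ∀ (error_locations : List Int), Dom_visualize_error error_locations → Spec_visualize_error error_locations (visualize_error error_locations)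

-- ===== LEMMAS AND PROOFS =====

-- the two cell strings
def pvX (i : Int) : String := "Q" ++ PySem.Int.toStr i ++ "[X]"
def pvB (i : Int) : String := "Q" ++ PySem.Int.toStr i ++ "[ ]"

-- B's update step, named for the lemmas (definitionally B's lambda)
def pvStep (cs : List String) (loc : Int) : List String :=
  if 0 ≤ loc ∧ loc < 7 then cs.set loc.toNat (pvX loc) else cs

lemma pvStep_length (cs : List String) (loc : Int) : (pvStep cs loc).length = cs.length := by
  unfold pvStep; split <;> simp

-- appending fold (A's loop shape) is a map
lemma pvFoldl_append (p : Int → Bool) (x y : Int → String) :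
    ∀ (r : List Int) (acc : List String),
      r.foldl (fun a i => if p i then a ++ [x i] else a ++ [y i]) acc
        = acc ++ r.map (fun i => if p i then x i else y i) := by
  intro r
  induction r with
  | nil => intro acc; simp
  | cons h t ih =>
    intro acc
    simp only [List.foldl_cons, List.map_cons]
    by_cases hp : p h <;> simp [hp, ih]

-- each cell after B's fold
lemma pvFold_get (locs : List Int) :
    ∀ (cs : List String) (i : Nat), i < cs.length → i < 7 →
      (locs.foldl pvStep cs)[i]? =
        if (i : Int) ∈ locs then some (pvX (i : Int)) else cs[i]? := by
  induction locs with
  | nil => intro cs i hi h7; simp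
  | cons l t ih =>
    intro cs i hi h7
    rw [List.foldl_cons, ih (pvStep cs l) i (by rw [pvStep_length]; exact hi) h7]
    by_cases hl : (i : Int) = l
    · subst hl
      have hguard : (0 : Int) ≤ (i : Int) ∧ (i : Int) < 7 := ⟨by positivity, by exact_mod_cast h7⟩
      have hset : (pvStep cs (i : Int))[i]? = some (pvX (i : Int)) := by
        unfold pvStep
        rw [if_pos hguard, List.getElem?_set]
        simp [hi]
      rw [hset]
      by_cases ht : (i : Int) ∈ t <;> simp [ht]
    · have hmem : ((i : Int) ∈ l :: t) ↔ ((i : Int) ∈ t) := by simp [hl]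
      by_cases ht : (i : Int) ∈ t
      · simp [ht, hmem]
      · simp only [ht, hmem, if_false]
        unfold pvStep
        split
        · next hg =>
          have hne : l.toNat ≠ i := by omega
          rw [List.getElem?_set]
          simp [hne]
        · rfl

lemma pvRange7 : PySem.List.pyRange 0 7 1 = [0, 1, 2, 3, 4, 5, 6] := by decide

-- the two 7-cell lists coincide
lemma pvLists_eq (locs : List Int) :
    ((PySem.List.pyRange 0 7 1).foldl
      (fun acc i =>
        if locs.contains i then acc ++ ["Q" ++ PySem.Int.toStr i ++ "[X]"]
        else acc ++ ["Q" ++ PySem.Int.toStr i ++ "[ ]"]) []) =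
    (locs.foldl
      (fun cs loc =>
        if 0 ≤ loc ∧ loc < 7 then cs.set loc.toNat ("Q" ++ PySem.Int.toStr loc ++ "[X]") else cs)
      ((PySem.List.pyRange 0 7 1).map (fun i => "Q" ++ PySem.Int.toStr i ++ "[ ]"))) := by
  have hA := pvFoldl_append (fun i => locs.contains i) pvX pvB (PySem.List.pyRange 0 7 1) []
  show _ = (locs.foldl pvStep ((PySem.List.pyRange 0 7 1).map pvB))
  rw [show (fun acc i =>
        if locs.contains i then acc ++ ["Q" ++ PySem.Int.toStr i ++ "[X]"]
        else acc ++ ["Q" ++ PySem.Int.toStr i ++ "[ ]"])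
      = (fun (a : List String) i => if locs.contains i then a ++ [pvX i] else a ++ [pvB i]) from rfl,
    hA, List.nil_append]
  have hlen0 : ((PySem.List.pyRange 0 7 1).map pvB).length = 7 := by
    rw [pvRange7]; rfl
  apply List.ext_getElem?
  intro i
  by_cases hi : i < 7
  · rw [pvFold_get locs _ i (by omega) hi]
    rw [pvRange7]
    interval_cases i <;>
      · simp only [List.map_cons, List.map_nil, List.getElem?_cons_zero, List.getElem?_cons_succ,
          List.contains_eq_mem, Nat.cast_ofNat, Nat.cast_zero, Nat.cast_one]
        split <;> simp_all
  · have h1 : (((PySem.List.pyRange 0 7 1)).map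
        (fun i => if locs.contains i then pvX i else pvB i)).length = 7 := by
      rw [pvRange7]; rfl
    have h2 : (locs.foldl pvStep ((PySem.List.pyRange 0 7 1).map pvB)).length = 7 := by
      have : ∀ (ls : List Int) (cs : List String), (ls.foldl pvStep cs).length = cs.length := by
        intro ls
        induction ls with
        | nil => intro cs; rfl
        | cons a t ih => intro cs; rw [List.foldl_cons, ih, pvStep_length]
      rw [this, hlen0]
    rw [List.getElem?_eq_none (by omega), List.getElem?_eq_none (by omega)]

-- ===== VERDICT (by name: the statement is the Claim_ definition above) =====
theorem visualize_error_spec : Claim_equal_visualize_error := by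
  intro locs _
  show visualize_error locs = visualize_error_alt locs
  unfold visualize_error visualize_error_alt
  rw [pvLists_eq locs]
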